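-- pv_equiv track=rewrite | github.com/IDEHCO3/hyper_resource_py | build/lib/generate_files/viewer_generator.py | unique_fields_views_snippets
-- ===== SOURCE A (Python) =====
-- TAB_1X = (' ' * 4)
--
-- TAB_2X = (' ' * 8)
--
-- TAB_3X = (' ' * 12)
--
-- def unique_fields_views_snippets(model_class_name, unique_fields_dict, is_list_view=True):
--     snippet_arr = []
--
--     if len(unique_fields_dict) > 0:
--         for field_type, field_name in unique_fields_dict.items():
--             snippet_arr.append('\n')
--             snippet_arr.append(TAB_1X + 'def get(self, request, format=None, *args, **kwargs):\n')
--             snippet_arr.append(TAB_2X + "if kwargs.get('" + field_name + "') is not None:\n")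
--             snippet_arr.append(TAB_3X + "kwargs['" + field_name + "'] = kwargs.get('" + field_name + "')\n")
--             snippet_arr.append(TAB_3X + "self.kwargs['" + field_name + "'] = kwargs.get('" + field_name + "')\n\n")
--
--             if is_list_view:
--                 snippet_arr.append(TAB_2X + 'return super(' + model_class_name + 'List, self).get(request, *args, **self.kwargs)\n\n')
--             else:
--                 snippet_arr.append(TAB_2X + 'return super(' + model_class_name + 'Detail, self).get(request, *args, **self.kwargs)\n\n')
--
--             snippet_arr.append('\n')
--             snippet_arr.append(TAB_1X + 'def options(self, request, *args, **kwargs):\n')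
--
--         for field_type, field_name in unique_fields_dict.items():
--             snippet_arr.append(TAB_2X + "if kwargs.get('" + field_name + "') is not None:\n")
--             snippet_arr.append(TAB_3X + "kwargs['" + field_name + "'] = kwargs.get('" + field_name + "')\n")
--             snippet_arr.append(TAB_3X + "self.kwargs['" + field_name + "'] = kwargs.get('" + field_name + "')\n\n")
--
--             if is_list_view:
--                 snippet_arr.append(TAB_2X + 'return super(' + model_class_name + 'List, self).get(request, *args, **self.kwargs)\n\n')
--             else:
--                 snippet_arr.append(TAB_2X + 'return super(' + model_class_name + 'Detail, self).get(request, *args, **self.kwargs)\n\n')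
--
--     return snippet_arr
-- ===== SOURCE B (Python) =====
-- TAB_1X = (' ' * 4)
--
-- TAB_2X = (' ' * 8)
--
-- TAB_3X = (' ' * 12)
--
-- def unique_fields_views_snippets(model_class_name, unique_fields_dict, is_list_view=True):
--     # One pass with two accumulators (get-blocks and options-bodies), concatenated at the end.
--     get_blocks = []
--     options_bodies = []
--     suffix = 'List' if is_list_view else 'Detail'
--     ret = TAB_2X + 'return super(' + model_class_name + suffix + ', self).get(request, *args, **self.kwargs)\n\n'
--     for field_name in unique_fields_dict.values():
--         body = [
--             TAB_2X + "if kwargs.get('" + field_name + "') is not None:\n",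
--             TAB_3X + "kwargs['" + field_name + "'] = kwargs.get('" + field_name + "')\n",
--             TAB_3X + "self.kwargs['" + field_name + "'] = kwargs.get('" + field_name + "')\n\n",
--             ret,
--         ]
--         get_blocks += ['\n', TAB_1X + 'def get(self, request, format=None, *args, **kwargs):\n'] + body
--         get_blocks += ['\n', TAB_1X + 'def options(self, request, *args, **kwargs):\n']
--         options_bodies += body
--     return get_blocks + options_bodies
-- ===== Notes on version B (the rewrite author's own statement) =====
-- stated objective: simpler
-- what changed: Replaces A's two sequential passes over the dict (get-blocks then options-bodies) with one pass maintaining two accumulator lists, sharing the per-field body snippets and the precomputed List/Detail return line, concatenated at the end; the empty-dict guard disappears.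
import Mathlib
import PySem

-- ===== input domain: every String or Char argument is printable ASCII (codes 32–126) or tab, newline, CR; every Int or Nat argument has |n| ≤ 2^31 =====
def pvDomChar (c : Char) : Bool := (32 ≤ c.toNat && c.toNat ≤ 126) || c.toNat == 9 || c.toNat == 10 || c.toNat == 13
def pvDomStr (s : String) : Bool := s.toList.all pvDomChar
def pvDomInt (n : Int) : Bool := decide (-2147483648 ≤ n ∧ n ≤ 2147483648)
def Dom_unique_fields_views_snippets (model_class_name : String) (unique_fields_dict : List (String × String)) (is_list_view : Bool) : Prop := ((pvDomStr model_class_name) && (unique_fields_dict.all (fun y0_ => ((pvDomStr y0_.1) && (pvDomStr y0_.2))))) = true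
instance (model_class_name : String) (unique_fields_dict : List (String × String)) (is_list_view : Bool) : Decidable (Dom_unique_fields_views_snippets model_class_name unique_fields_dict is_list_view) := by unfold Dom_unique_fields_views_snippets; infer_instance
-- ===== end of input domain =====

-- B replaces A's two sequential passes over the dict with one pass keeping two accumulator
-- lists (get-blocks and options-bodies), concatenated at the end; objective: simpler.

def TAB_1X : String := "    "
def TAB_2X : String := "        "
def TAB_3X : String := "            "

-- ===== PORT A =====
def unique_fields_views_snippets (model_class_name : String) (unique_fields_dict : List (String × String)) (is_list_view : Bool) : List String :=
  let snippet_arr : List String := []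
  if unique_fields_dict.length > 0 then
    -- first loop: get-method blocks plus the options header
    let snippet_arr := unique_fields_dict.foldl (fun acc p =>
      let field_name := p.2
      acc ++ ["\n",
        TAB_1X ++ "def get(self, request, format=None, *args, **kwargs):\n",
        TAB_2X ++ "if kwargs.get('" ++ field_name ++ "') is not None:\n",
        TAB_3X ++ "kwargs['" ++ field_name ++ "'] = kwargs.get('" ++ field_name ++ "')\n",
        TAB_3X ++ "self.kwargs['" ++ field_name ++ "'] = kwargs.get('" ++ field_name ++ "')\n\n",
        (if is_list_view then
          TAB_2X ++ "return super(" ++ model_class_name ++ "List, self).get(request, *args, **self.kwargs)\n\n"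
        else
          TAB_2X ++ "return super(" ++ model_class_name ++ "Detail, self).get(request, *args, **self.kwargs)\n\n"),
        "\n",
        TAB_1X ++ "def options(self, request, *args, **kwargs):\n"]) snippet_arr
    -- second loop: options bodies
    unique_fields_dict.foldl (fun acc p =>
      let field_name := p.2
      acc ++ [TAB_2X ++ "if kwargs.get('" ++ field_name ++ "') is not None:\n",
        TAB_3X ++ "kwargs['" ++ field_name ++ "'] = kwargs.get('" ++ field_name ++ "')\n",
        TAB_3X ++ "self.kwargs['" ++ field_name ++ "'] = kwargs.get('" ++ field_name ++ "')\n\n",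
        (if is_list_view then
          TAB_2X ++ "return super(" ++ model_class_name ++ "List, self).get(request, *args, **self.kwargs)\n\n"
        else
          TAB_2X ++ "return super(" ++ model_class_name ++ "Detail, self).get(request, *args, **self.kwargs)\n\n")]) snippet_arr
  else snippet_arr

-- ===== PORT B =====
def altBody (ret field_name : String) : List String :=
  [TAB_2X ++ "if kwargs.get('" ++ field_name ++ "') is not None:\n",
   TAB_3X ++ "kwargs['" ++ field_name ++ "'] = kwargs.get('" ++ field_name ++ "')\n",
   TAB_3X ++ "self.kwargs['" ++ field_name ++ "'] = kwargs.get('" ++ field_name ++ "')\n\n",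
   ret]

def unique_fields_views_snippets_alt (model_class_name : String) (unique_fields_dict : List (String × String)) (is_list_view : Bool) : List String :=
  let suffix := if is_list_view then "List" else "Detail"
  let ret := TAB_2X ++ "return super(" ++ model_class_name ++ suffix ++ ", self).get(request, *args, **self.kwargs)\n\n"
  let acc := unique_fields_dict.foldl (fun (acc : List String × List String) p =>
    let body := altBody ret p.2
    (acc.1 ++ ["\n", TAB_1X ++ "def get(self, request, format=None, *args, **kwargs):\n"] ++ body
           ++ ["\n", TAB_1X ++ "def options(self, request, *args, **kwargs):\n"],
     acc.2 ++ body)) ([], [])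
  acc.1 ++ acc.2

-- ===== PRECONDITION & SPEC =====
def Spec_unique_fields_views_snippets (model_class_name : String) (unique_fields_dict : List (String × String)) (is_list_view : Bool) (out : List String) : Prop := out = unique_fields_views_snippets_alt model_class_name unique_fields_dict is_list_view
instance (model_class_name : String) (unique_fields_dict : List (String × String)) (is_list_view : Bool) (out : List String) : Decidable (Spec_unique_fields_views_snippets model_class_name unique_fields_dict is_list_view out) := by unfold Spec_unique_fields_views_snippets; infer_instance

-- ===== CLAIM (what is proved, stated in full; the proofs are below) =====
def Claim_equal_unique_fields_views_snippets : Prop := ∀ (model_class_name : String) (unique_fields_dict : List (String × String)) (is_list_view : Bool), Dom_unique_fields_views_snippets model_class_name unique_fields_dict is_list_view → Spec_unique_fields_views_snippets model_class_name unique_fields_dict is_list_view (unique_fields_views_snippets model_class_name unique_fields_dict is_list_view)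

-- ===== LEMMAS AND PROOFS =====

-- the paired fold splits into the two component folds
theorem pairFold_split {α : Type} (f g : α → List String) :
    ∀ (d : List α) (a b : List String),
    d.foldl (fun (p : List String × List String) x => (p.1 ++ f x, p.2 ++ g x)) (a, b)
      = (d.foldl (fun acc x => acc ++ f x) a, d.foldl (fun acc x => acc ++ g x) b) := by
  intro d
  induction d with
  | nil => intro a b; rfl
  | cons x xs ih => intro a b; simpa using ih (a ++ f x) (b ++ g x)

theorem strCatList : ("List" : String) ++ ", self).get(request, *args, **self.kwargs)\n\n" = "List, self).get(request, *args, **self.kwargs)\n\n" := rfl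
theorem strCatDetail : ("Detail" : String) ++ ", self).get(request, *args, **self.kwargs)\n\n" = "Detail, self).get(request, *args, **self.kwargs)\n\n" := rfl

-- ===== VERDICT (by name: the statement is the Claim_ definition above) =====
theorem unique_fields_views_snippets_spec : Claim_equal_unique_fields_views_snippets := by
  intro m d il _
  show unique_fields_views_snippets m d il = unique_fields_views_snippets_alt m d il
  cases d with
  | nil => cases il <;> rfl
  | cons p ps =>
    cases il <;>
      simp [unique_fields_views_snippets, unique_fields_views_snippets_alt, altBody,
        pairFold_split, String.append_assoc, strCatList, strCatDetail]
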